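-- pv_equiv track=rewrite | github.com/AugustDanell/Kattis-Assignments | Python/digits.py | rec
-- ===== SOURCE A (Python) =====
-- def rec(line, prev, acc = 0):
--     next = len(line)
--     if prev == next:
--         return acc+1
--     else:
--         acc += 1
--         next_line = str(next)
--         prev = next
--         return rec(next_line, prev, acc)
-- ===== SOURCE B (Python) =====
-- def ndigits(n):
--     d = 1
--     while n >= 10:
--         n //= 10
--         d += 1
--     return d
--
--
-- def rec(line, prev, acc=0):
--     n = len(line)
--     while prev != n:
--         acc += 1
--         prev = n
--         n = ndigits(n)
--     return acc + 1
-- ===== Notes on version B (the rewrite author's own statement) =====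
-- stated objective: alternative
-- what changed: A's string-rebuilding tail recursion (str(next) each step) is replaced by an iterative fixed-point loop over integers whose step is an arithmetic digit count (repeated //10), so no strings are built after the first len.
import Mathlib
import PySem

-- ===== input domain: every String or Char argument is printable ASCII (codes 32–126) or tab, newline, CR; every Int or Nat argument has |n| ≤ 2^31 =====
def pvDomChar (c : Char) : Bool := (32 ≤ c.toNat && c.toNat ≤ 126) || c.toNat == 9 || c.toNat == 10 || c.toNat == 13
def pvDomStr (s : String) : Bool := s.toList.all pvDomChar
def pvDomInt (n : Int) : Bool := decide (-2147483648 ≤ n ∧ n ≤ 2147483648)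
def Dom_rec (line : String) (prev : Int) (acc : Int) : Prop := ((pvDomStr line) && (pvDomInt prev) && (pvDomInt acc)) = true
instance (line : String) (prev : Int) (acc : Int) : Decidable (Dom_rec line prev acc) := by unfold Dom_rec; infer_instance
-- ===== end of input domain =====

-- B replaces A's string-rebuilding tail recursion (str(next) each step) by an iterative
-- fixed-point loop over integers with an arithmetic digit count (objective: alternative).
-- Both loops are encoded with a fuel parameter that provably never runs out (tail fuel
-- bound proved in recFuel_enough below); the fuel is only a totality guard.

-- ===== PORT A =====
def recFuel : Nat → String → Int → Int → Int
  | 0, _, _, acc => acc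
  | f + 1, line, prev, acc =>
    let next : Int := PySem.Str.len line
    if prev = next then acc + 1 else recFuel f (PySem.Int.toStr next) next (acc + 1)

def rec (line : String) (prev : Int) (acc : Int) : Int :=
  recFuel ((PySem.Str.len line).toNat + 3) line prev acc

-- ===== PORT B =====
-- B's `while n >= 10` loop in ndigits
def ndigitsFuel : Nat → Nat → Nat → Nat
  | 0, _, d => d
  | f + 1, n, d => if 10 ≤ n then ndigitsFuel f (n / 10) (d + 1) else d

def ndigits (n : Nat) : Nat := ndigitsFuel (n + 1) n 1

-- B's `while prev != n` loop
def bLoopFuel : Nat → Int → Nat → Int → Int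
  | 0, _, _, acc => acc
  | g + 1, prev, n, acc =>
    if prev = (n : Int) then acc + 1 else bLoopFuel g (n : Int) (ndigits n) (acc + 1)

def rec_alt (line : String) (prev : Int) (acc : Int) : Int :=
  bLoopFuel ((PySem.Str.len line).toNat + 3) prev (PySem.Str.len line).toNat acc

-- ===== PRECONDITION & SPEC =====
def Spec_rec (line : String) (prev : Int) (acc : Int) (out : Int) : Prop := out = rec_alt line prev acc
instance (line : String) (prev : Int) (acc : Int) (out : Int) : Decidable (Spec_rec line prev acc out) := by unfold Spec_rec; infer_instance

-- ===== CLAIM (what is proved, stated in full; the proofs are below) =====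
def Claim_equal_rec : Prop := ∀ (line : String) (prev : Int) (acc : Int), Dom_rec line prev acc → Spec_rec line prev acc (rec line prev acc)

-- ===== LEMMAS AND PROOFS =====

-- number of decimal-digit divisions until 0
def digCount (n : Nat) : Nat :=
  if h : n = 0 then 0 else digCount (n / 10) + 1
decreasing_by exact Nat.div_lt_self (Nat.pos_of_ne_zero h) (by decide)

theorem digCount_pos (n : Nat) (h : 1 ≤ n) : 1 ≤ digCount n := by
  rw [digCount, dif_neg (by omega : ¬ n = 0)]
  omega

-- the ndigits while-loop computes digCount whenever the fuel exceeds n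
theorem ndigitsFuel_eq_digCount (m : Nat) : ∀ f d, m < f → 1 ≤ m →
    ndigitsFuel f m d = digCount m + d - 1 := by
  induction m using Nat.strong_induction_on with
  | _ m ih =>
    intro f d hf hm
    obtain ⟨f', rfl⟩ : ∃ k, f = k + 1 := ⟨f - 1, by omega⟩
    rw [ndigitsFuel]
    by_cases h10 : 10 ≤ m
    · simp only [h10, if_true]
      have hdiv : m / 10 < m := Nat.div_lt_self (by omega) (by omega)
      rw [ih (m / 10) hdiv f' (d + 1) (by omega) (by omega)]
      have e : digCount m = digCount (m / 10) + 1 := by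
        rw [digCount, dif_neg (by omega : ¬ m = 0)]
      have := digCount_pos (m / 10) (by omega)
      omega
    · simp only [h10, if_false]
      rw [digCount, dif_neg (by omega : ¬ m = 0)]
      have : m / 10 = 0 := by omega
      rw [this, digCount, dif_pos rfl]
      omega

theorem ndigits_eq_digCount (n : Nat) (h : 1 ≤ n) : ndigits n = digCount n := by
  rw [ndigits, ndigitsFuel_eq_digCount n (n + 1) 1 (by omega) h]
  have := digCount_pos n h
  omega

theorem digCount_lt (n : Nat) (h : 2 ≤ n) : digCount n < n := by
  induction n using Nat.strong_induction_on with
  | _ n ih =>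
    rw [digCount, dif_neg (by omega : ¬ n = 0)]
    rcases Nat.lt_or_ge (n / 10) 2 with hq | hq
    · rcases Nat.lt_or_ge (n / 10) 1 with h0 | h1
      · rw [Nat.lt_one_iff.mp h0, digCount, dif_pos rfl]
        omega
      · have h10 : 10 ≤ n := (Nat.one_le_div_iff (by decide)).mp h1
        have e : n / 10 = 1 := by omega
        rw [e, digCount, dif_neg (by decide : ¬ (1 : Nat) = 0)]
        rw [show (1 : Nat) / 10 = 0 from rfl, digCount, dif_pos rfl]
        omega
    · have hlt : n / 10 < n := Nat.div_lt_self (by omega) (by decide)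
      have := ih (n / 10) hlt hq
      omega

-- length of Nat.toDigits 10 (= the digits of str(n)) equals digCount for n ≥ 1
theorem toDigitsCore_len_eq_digCount (n : Nat) : ∀ f : Nat, n < f → 1 ≤ n →
    (Nat.toDigitsCore 10 f n []).length = digCount n := by
  induction n using Nat.strong_induction_on with
  | _ n ih =>
    intro f hf hn
    match f with
    | f + 1 =>
      rw [Nat.toDigitsCore, digCount, dif_neg (by omega : ¬ n = 0)]
      by_cases hq : n / 10 = 0
      · rw [if_pos hq, hq, digCount, dif_pos rfl, List.length_singleton]
      · rw [if_neg hq, Nat.toDigitsCore_lens_eq,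
          ih (n / 10) (Nat.div_lt_self hn (by decide)) f (by omega) (by omega)]

-- len(str(n)) = ndigits n for every Nat n (including 0: str(0) = "0")
theorem len_str_eq_ndigits (n : Nat) :
    (PySem.Int.toChars ((n : Nat) : Int)).length = ndigits n := by
  by_cases h : n = 0
  · subst h; decide
  · simp only [PySem.Int.toChars, show ¬ ((n : Int) < 0) from by simp, if_false,
      Int.toNat_natCast]
    rw [show Nat.toDigits 10 n = Nat.toDigitsCore 10 (n + 1) n [] from rfl,
      toDigitsCore_len_eq_digCount n (n + 1) (by omega) (by omega),
      ndigits_eq_digCount n (by omega)]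

theorem ndigits_lt (n : Nat) (h : 2 ≤ n) : ndigits n < n := by
  rw [ndigits_eq_digCount n (by omega)]
  exact digCount_lt n h

theorem ndigits_zero : ndigits 0 = 1 := by decide

theorem ndigits_one : ndigits 1 = 1 := by decide

-- joint measure: number of remaining loop iterations is below this
def bMeasure (n : Nat) (prev : Int) : Nat :=
  if 2 ≤ n then n + 2 else if n = 0 then 2 else if prev = 1 then 0 else 1

theorem bMeasure_step (n : Nat) (prev : Int) (h : ¬ prev = (n : Int)) :
    bMeasure (ndigits n) (n : Int) < bMeasure n prev := by
  match n with
  | 0 => rw [ndigits_zero]; norm_num [bMeasure]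
  | 1 =>
    rw [ndigits_one]
    have hp : ¬ prev = 1 := by simpa using h
    norm_num [bMeasure, hp]
  | (m + 2) =>
    have hlt : ndigits (m + 2) < m + 2 := ndigits_lt _ (by omega)
    unfold bMeasure
    split_ifs <;> omega

-- main invariant: with enough fuel on both sides, A's recursion equals B's loop
theorem fuel_eq (m : Nat) : ∀ (line : String) (prev acc : Int) (f g : Nat),
    bMeasure line.toList.length prev ≤ m →
    bMeasure line.toList.length prev < f →
    bMeasure line.toList.length prev < g →
    recFuel f line prev acc = bLoopFuel g prev line.toList.length acc := by
  induction m with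
  | zero =>
    intro line prev acc f g hm hf hg
    obtain ⟨f', rfl⟩ : ∃ k, f = k + 1 := ⟨f - 1, by omega⟩
    obtain ⟨g', rfl⟩ : ∃ k, g = k + 1 := ⟨g - 1, by omega⟩
    rw [recFuel, bLoopFuel]
    simp only [PySem.Str.len_eq]
    by_cases heq : prev = (line.toList.length : Int)
    · simp [heq]
    · exfalso
      unfold bMeasure at hm
      generalize hgl : line.toList.length = n at *
      split_ifs at hm <;> omega
  | succ m ih =>
    intro line prev acc f g hm hf hg
    obtain ⟨f', rfl⟩ : ∃ k, f = k + 1 := ⟨f - 1, by omega⟩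
    obtain ⟨g', rfl⟩ : ∃ k, g = k + 1 := ⟨g - 1, by omega⟩
    rw [recFuel, bLoopFuel]
    simp only [PySem.Str.len_eq]
    by_cases heq : prev = (line.toList.length : Int)
    · simp [heq]
    · simp only [heq, if_false]
      have hlen : (PySem.Int.toStr ((line.toList.length : Nat) : Int)).toList.length
          = ndigits line.toList.length := by
        rw [PySem.Int.toList_toStr]; exact len_str_eq_ndigits _
      have hstep := bMeasure_step line.toList.length prev heq
      have := ih (PySem.Int.toStr ((line.toList.length : Nat) : Int))
          (line.toList.length : Int) (acc + 1) f' g'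
          (by rw [hlen]; omega) (by rw [hlen]; omega) (by rw [hlen]; omega)
      rw [hlen] at this
      exact this

-- the fixed tail fuel len+3 always exceeds the measure
theorem recFuel_enough (n : Nat) (prev : Int) : bMeasure n prev < n + 3 := by
  unfold bMeasure
  split_ifs <;> omega

-- ===== VERDICT (by name: the statement is the Claim_ definition above) =====
theorem rec_spec : Claim_equal_rec := by
  intro line prev acc _
  unfold Spec_rec rec_alt rec
  rw [PySem.Str.len_eq, Int.toNat_natCast]
  exact fuel_eq (bMeasure line.toList.length prev) line prev acc _ _
    (le_refl _) (recFuel_enough _ _) (recFuel_enough _ _)
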